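-- pv_equiv track=rewrite | github.com/hungdoan-tech/automation-tool | src/Utilities.py | escape_for_batch
-- ===== SOURCE A (Python) =====
-- def escape_for_batch(text) -> str:
--     special_chars: set[str] = {'%', '!', '^', '<', '>', '&', '|', '=', '+', ';', ',', '(', ')', '[', ']', '{', '}', '"'}
--     new_line: str = ''
--     # Escape each special character with a caret (^)
--     for char in text:
--         if char in special_chars:
--             new_line += f'^{char}'
--         else:
--             new_line += char
--
--     return new_line
-- ===== SOURCE B (Python) =====
-- def escape_for_batch(text) -> str:
--     special_chars: set[str] = {'%', '!', '^', '<', '>', '&', '|', '=', '+', ';', ',', '(', ')', '[', ']', '{', '}', '"'}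
--     table = {ord(c): '^' + c for c in special_chars}
--     return text.translate(table)
-- ===== Notes on version B (the rewrite author's own statement) =====
-- stated objective: faster
-- what changed: B builds a translation table once (ord -> '^'+char) and performs the whole escaping in a single C-level str.translate call instead of A's per-character Python loop with membership test and quadratic-prone string concatenation.
import Mathlib
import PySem

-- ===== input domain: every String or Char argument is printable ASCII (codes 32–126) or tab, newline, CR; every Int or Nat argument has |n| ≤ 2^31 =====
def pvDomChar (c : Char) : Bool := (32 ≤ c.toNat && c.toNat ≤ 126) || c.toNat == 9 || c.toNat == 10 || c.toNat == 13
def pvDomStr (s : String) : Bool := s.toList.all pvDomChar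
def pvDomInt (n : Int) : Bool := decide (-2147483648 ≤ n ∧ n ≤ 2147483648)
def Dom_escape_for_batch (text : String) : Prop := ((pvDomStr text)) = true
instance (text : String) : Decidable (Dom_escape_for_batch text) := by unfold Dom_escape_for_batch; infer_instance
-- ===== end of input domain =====

-- B replaces A's per-character loop-and-branch by a prebuilt translation table and one str.translate pass (idiomatic).


-- ===== PORT A =====
def escape_for_batch (text : String) : String :=
  let special_chars : PySem.Set Char :=
    PySem.Set.ofList ['%', '!', '^', '<', '>', '&', '|', '=', '+', ';', ',', '(', ')', '[', ']', '{', '}', '"']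
  -- new_line accumulator; for char in text: append '^'+char or char
  String.mk (text.toList.foldl
    (fun new_line char =>
      if special_chars.contains char then new_line ++ ['^', char] else new_line ++ [char]) [])

-- ===== PORT B =====
-- the translation table {ord(c): '^'+c for c in special_chars}; keyed by Char (ord is a bijection on Char)
def pvBatchTable : PySem.Dict Char (List Char) :=
  (PySem.Set.ofList ['%', '!', '^', '<', '>', '&', '|', '=', '+', ';', ',', '(', ')', '[', ']', '{', '}', '"']).foldl
    (fun table c => table.insert c ['^', c]) PySem.Dict.empty

-- text.translate(table): each character is replaced by its table entry, or kept if absent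
def escape_for_batch_alt (text : String) : String :=
  String.mk (text.toList.flatMap (fun c => (pvBatchTable.get? c).getD [c]))

-- ===== PRECONDITION & SPEC =====
def Spec_escape_for_batch (text : String) (out : String) : Prop := out = escape_for_batch_alt text
instance (text : String) (out : String) : Decidable (Spec_escape_for_batch text out) := by unfold Spec_escape_for_batch; infer_instance

-- ===== CLAIM (what is proved, stated in full; the proofs are below) =====
def Claim_equal_escape_for_batch : Prop := ∀ (text : String), Dom_escape_for_batch text → Spec_escape_for_batch text (escape_for_batch text)

-- ===== LEMMAS AND PROOFS =====

theorem get?_foldl_insert_esc (l : List Char) (d : PySem.Dict Char (List Char)) (c : Char) :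
    (l.foldl (fun table x => table.insert x ['^', x]) d).get? c
      = if c ∈ l then some ['^', c] else d.get? c := by
  induction l generalizing d with
  | nil => simp
  | cons x l ih =>
    simp only [List.foldl_cons, ih, PySem.Dict.get?_insert, List.mem_cons]
    by_cases hl : c ∈ l
    · simp [hl]
    · by_cases hx : c = x <;> simp [hl, hx]

theorem perChar_esc (c : Char) :
    (pvBatchTable.get? c).getD [c]
      = if (PySem.Set.ofList ['%', '!', '^', '<', '>', '&', '|', '=', '+', ';', ',', '(', ')', '[', ']', '{', '}', '"'] : PySem.Set Char).contains c
        then ['^', c] else [c] := by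
  unfold pvBatchTable
  rw [get?_foldl_insert_esc]
  by_cases h : c ∈ (PySem.Set.ofList ['%', '!', '^', '<', '>', '&', '|', '=', '+', ';', ',', '(', ')', '[', ']', '{', '}', '"'] : PySem.Set Char) <;>
    simp [h, PySem.Set.contains]

-- ===== VERDICT (by name: the statement is the Claim_ definition above) =====
theorem escape_for_batch_spec : Claim_equal_escape_for_batch := by
  intro text _
  unfold Spec_escape_for_batch escape_for_batch escape_for_batch_alt
  show String.mk (text.toList.foldl
      (fun new_line char =>
        if (PySem.Set.ofList ['%', '!', '^', '<', '>', '&', '|', '=', '+', ';', ',', '(', ')', '[', ']', '{', '}', '\"'] : PySem.Set Char).contains char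
        then new_line ++ ['^', char] else new_line ++ [char]) []) = _
  congr 1
  rw [show (fun (new_line : List Char) (char : Char) =>
        if (PySem.Set.ofList ['%', '!', '^', '<', '>', '&', '|', '=', '+', ';', ',', '(', ')', '[', ']', '{', '}', '"'] : PySem.Set Char).contains char
        then new_line ++ ['^', char] else new_line ++ [char])
      = fun (new_line : List Char) (char : Char) =>
        new_line ++ (pvBatchTable.get? char).getD [char] from by
    funext acc c; rw [perChar_esc]; split <;> rfl]
  rw [PySem.List.foldl_append_eq_flatMap]
  simp
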